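-- pv_equiv track=rewrite | github.com/Kauzge/tichu_tournament_plan | script/main.py | check_combinations
-- ===== SOURCE A (Python) =====
-- def check_combinations(tournament_plan:list) -> bool:
--     """Checks if the same combination of players is on multiple tables in the tournament"""
--     found_combinations = []
--     for match in tournament_plan:
--         for table in match:
--             for i in range(0, len(table), 2):
--                 # Loop through the match list in steps of 2 and get the teams of each match
--                 team = table[i:i+2]
--                 if team in found_combinations or team[::-1] in found_combinations:
--                     # If the team is already in the found_combinations list, return True
--                     return True
--                 found_combinations.append(team)
--     # If no combination is found twice, return False
--     return False
-- ===== SOURCE B (Python) =====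
-- def check_combinations(tournament_plan: list) -> bool:
--     """Checks if the same combination of players is on multiple tables in the tournament"""
--     keys = [tuple(sorted(table[i:i+2]))
--             for match in tournament_plan
--             for table in match
--             for i in range(0, len(table), 2)]
--     keys.sort()
--     return any(a == b for a, b in zip(keys, keys[1:]))
-- ===== Notes on version B (the rewrite author's own statement) =====
-- stated objective: alternative
-- what changed: A scans as it goes, testing each team and its reversal for membership in a growing list with an early return; B collects canonical sorted-pair keys in one pass, sorts the key list, and reports a duplicate iff some adjacent sorted keys are equal.
import Mathlib
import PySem

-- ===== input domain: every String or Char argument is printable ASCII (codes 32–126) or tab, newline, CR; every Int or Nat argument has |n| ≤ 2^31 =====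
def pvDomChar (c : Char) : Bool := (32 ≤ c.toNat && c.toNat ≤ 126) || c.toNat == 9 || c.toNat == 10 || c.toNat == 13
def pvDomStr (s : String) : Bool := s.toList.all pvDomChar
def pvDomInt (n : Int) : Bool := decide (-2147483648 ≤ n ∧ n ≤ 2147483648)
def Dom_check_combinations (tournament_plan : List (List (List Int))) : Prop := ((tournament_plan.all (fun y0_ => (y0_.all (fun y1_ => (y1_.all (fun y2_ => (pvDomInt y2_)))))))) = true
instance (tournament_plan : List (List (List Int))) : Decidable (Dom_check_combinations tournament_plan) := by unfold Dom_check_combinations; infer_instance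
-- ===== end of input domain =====

-- B replaces A's scan-as-you-go duplicate search (membership test against a growing list, with
-- early return) by sort-then-scan: collect canonical sorted-pair keys, sort them, and look for
-- an equal adjacent pair; objective: alternative (a different duplicate-detection algorithm).

-- ===== PORT A =====
-- innermost loop 'for i in range(0, len(table), 2)' with the early 'return True' (none = returned True)
def pvGoTable (table : List Int) (idxs : List Int) (found : List (List Int)) :
    Option (List (List Int)) :=
  match idxs with
  | [] => some found
  | i :: rest =>
    let team := PySem.List.slice table (some i) (some (i + 2))
    -- 'team[::-1]' is team.reverse (exact: PySem.List.slice?_none_none_neg_one)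
    if found.contains team || found.contains team.reverse then none
    else pvGoTable table rest (found ++ [team])

-- 'for table in match'
def pvGoMatch (mtch : List (List Int)) (found : List (List Int)) : Option (List (List Int)) :=
  match mtch with
  | [] => some found
  | table :: rest =>
    match pvGoTable table (PySem.List.pyRange 0 (table.length : Int) 2) found with
    | none => none
    | some f => pvGoMatch rest f

-- 'for match in tournament_plan'
def pvGoPlan (plan : List (List (List Int))) (found : List (List Int)) : Option (List (List Int)) :=
  match plan with
  | [] => some found
  | m :: rest =>
    match pvGoMatch m found with
    | none => none
    | some f => pvGoPlan rest f

def check_combinations (tournament_plan : List (List (List Int))) : Bool :=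
  (pvGoPlan tournament_plan []).isNone

-- ===== PORT B =====
-- the comprehension collecting tuple(sorted(table[i:i+2])) keys, then keys.sort() and
-- 'any(a == b for a, b in zip(keys, keys[1:]))'
def check_combinations_alt (tournament_plan : List (List (List Int))) : Bool :=
  let keys := tournament_plan.flatMap (fun mtch => mtch.flatMap (fun table =>
    (PySem.List.pyRange 0 (table.length : Int) 2).map (fun i =>
      PySem.List.sorted (PySem.List.slice table (some i) (some (i + 2))) (fun x => x) false)))
  let sortedKeys := PySem.List.sorted keys (fun x => x) false
  (sortedKeys.zip (PySem.List.slice sortedKeys (some 1) none)).any (fun p => p.1 == p.2)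

-- ===== PRECONDITION & SPEC =====
def Spec_check_combinations (tournament_plan : List (List (List Int))) (out : Bool) : Prop := out = check_combinations_alt tournament_plan
instance (tournament_plan : List (List (List Int))) (out : Bool) : Decidable (Spec_check_combinations tournament_plan out) := by unfold Spec_check_combinations; infer_instance

-- ===== CLAIM (what is proved, stated in full; the proofs are below) =====
def Claim_equal_check_combinations : Prop := ∀ (tournament_plan : List (List (List Int))), Dom_check_combinations tournament_plan → Spec_check_combinations tournament_plan (check_combinations tournament_plan)

-- ===== LEMMAS AND PROOFS =====

-- canonical key of a team (what B's tuple(sorted(team)) computes)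
def pvCanon (t : List Int) : List Int := PySem.List.sorted t (fun x => x) false

-- generic form of A's scan over a flat list of teams
def pvScan (found : List (List Int)) : List (List Int) → Option (List (List Int))
  | [] => some found
  | t :: ts =>
    if found.contains t || found.contains t.reverse then none
    else pvScan (found ++ [t]) ts

-- the teams one table contributes, in order
def pvTeams (table : List Int) : List (List Int) :=
  (PySem.List.pyRange 0 (table.length : Int) 2).map
    (fun i => PySem.List.slice table (some i) (some (i + 2)))

lemma pvScan_append (ts us : List (List Int)) (found : List (List Int)) :
    pvScan found (ts ++ us) = (pvScan found ts).bind (fun f => pvScan f us) := by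
  induction ts generalizing found with
  | nil => simp [pvScan]
  | cons t ts ih =>
    simp only [List.cons_append, pvScan]
    split
    · rfl
    · exact ih _

lemma pvGoTable_eq (table : List Int) (idxs : List Int) (found : List (List Int)) :
    pvGoTable table idxs found
      = pvScan found (idxs.map (fun i => PySem.List.slice table (some i) (some (i + 2)))) := by
  induction idxs generalizing found with
  | nil => rfl
  | cons i rest ih =>
    simp only [pvGoTable, List.map_cons, pvScan]
    split
    · rfl
    · exact ih _

lemma pvGoMatch_eq (mtch : List (List Int)) (found : List (List Int)) :
    pvGoMatch mtch found = pvScan found (mtch.flatMap pvTeams) := by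
  induction mtch generalizing found with
  | nil => rfl
  | cons table rest ih =>
    have hT : (PySem.List.pyRange 0 (table.length : Int) 2).map
        (fun i => PySem.List.slice table (some i) (some (i + 2))) = pvTeams table := rfl
    simp only [pvGoMatch, List.flatMap_cons, pvScan_append, pvGoTable_eq, hT]
    cases h : pvScan found (pvTeams table) with
    | none => rfl
    | some f => simpa using ih f

lemma pvGoPlan_eq (plan : List (List (List Int))) (found : List (List Int)) :
    pvGoPlan plan found = pvScan found (plan.flatMap (fun m => m.flatMap pvTeams)) := by
  induction plan generalizing found with
  | nil => rfl
  | cons m rest ih =>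
    simp only [pvGoPlan, List.flatMap_cons, pvScan_append, pvGoMatch_eq]
    cases pvScan found (m.flatMap pvTeams) with
    | none => rfl
    | some f => simpa using ih f

lemma pvTeams_len {table : List Int} {t : List Int} (ht : t ∈ pvTeams table) : t.length ≤ 2 := by
  simp only [pvTeams, List.mem_map] at ht
  obtain ⟨i, hi, rfl⟩ := ht
  have h0 : (0:Int) ≤ i := ((PySem.List.mem_pyRange_iff_of_pos (by norm_num) i).1 hi).1
  rw [PySem.List.slice_toNat table h0 (by omega)]
  have : (i + 2).toNat - i.toNat = 2 := by omega
  simp [this]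

-- for teams of length ≤ 2, equal canonical keys means equal up to reversal
lemma pvCanon_eq_iff {s t : List Int} (hs : s.length ≤ 2) (ht : t.length ≤ 2) :
    pvCanon s = pvCanon t ↔ (s = t ∨ s = t.reverse) := by
  rcases s with _ | ⟨a, _ | ⟨b, _ | ⟨c, s⟩⟩⟩ <;>
    rcases t with _ | ⟨x, _ | ⟨y, _ | ⟨z, t⟩⟩⟩ <;>
    simp_all [pvCanon, PySem.List.sorted, PySem.List.insertBy] <;>
    split_ifs <;> simp_all <;> omega

lemma pvScan_none_iff (ts : List (List Int)) (found : List (List Int))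
    (hts : ∀ t ∈ ts, t.length ≤ 2) (hf : ∀ t ∈ found, t.length ≤ 2)
    (hnd : (found.map pvCanon).Nodup) :
    (pvScan found ts = none) ↔ ¬ ((found ++ ts).map pvCanon).Nodup := by
  induction ts generalizing found with
  | nil => simpa [pvScan] using hnd
  | cons t ts ih =>
    have htl : t.length ≤ 2 := hts t (by simp)
    have hmem : (found.contains t || found.contains t.reverse) = true
        ↔ pvCanon t ∈ found.map pvCanon := by
      simp only [Bool.or_eq_true, List.contains_iff_mem, List.mem_map]
      constructor
      · rintro (h | h)
        · exact ⟨t, h, rfl⟩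
        · refine ⟨t.reverse, h, ?_⟩
          exact (pvCanon_eq_iff (by simpa using htl) htl).2 (Or.inr rfl)
      · rintro ⟨u, hu, hcu⟩
        rcases (pvCanon_eq_iff (hf u hu) htl).1 hcu with h | h
        · exact Or.inl (h ▸ hu)
        · right
          have : u = t.reverse := h
          exact this ▸ hu
    by_cases hc : (found.contains t || found.contains t.reverse) = true
    · rw [pvScan, if_pos hc]
      refine iff_of_true rfl ?_
      intro hnodup
      rw [List.map_append] at hnodup
      have hdisj := List.disjoint_of_nodup_append hnodup
      exact hdisj (hmem.1 hc) (List.mem_map_of_mem (List.mem_cons_self ..))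
    · have hnotmem : pvCanon t ∉ found.map pvCanon := fun h => hc (hmem.2 h)
      rw [pvScan, if_neg hc]
      have hnd' : ((found ++ [t]).map pvCanon).Nodup := by
        rw [List.map_append, List.nodup_append]
        refine ⟨hnd, by simp, ?_⟩
        intro k hk1 b hb hkb
        rw [List.map_cons, List.map_nil, List.mem_singleton] at hb
        exact hnotmem ((hkb.trans hb) ▸ hk1)
      have hrec := ih (found ++ [t]) (fun u hu => hts u (by simp [hu]))
        (by
          intro u hu
          rcases List.mem_append.1 hu with h | h
          · exact hf u h
          · simp at h; exact h ▸ htl)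
        hnd'
      rw [hrec, List.append_assoc, List.singleton_append]

-- a list sorted into non-decreasing order has an equal adjacent pair iff it has a duplicate
lemma pvAdj (S : List (List Int)) (hp : S.Pairwise (· ≤ ·)) :
    ((S.zip S.tail).any (fun p => p.1 == p.2) = true) ↔ ¬ S.Nodup := by
  induction S with
  | nil => simp
  | cons a t ih =>
    cases t with
    | nil => simp
    | cons b u =>
      have hab : a ≤ b := (List.pairwise_cons.1 hp).1 b (by simp)
      have hau : ∀ x ∈ u, a ≤ x := fun x hx => (List.pairwise_cons.1 hp).1 x (by simp [hx])
      have hbu : ∀ x ∈ u, b ≤ x := fun x hx =>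
        (List.pairwise_cons.1 (List.pairwise_cons.1 hp).2).1 x hx
      have ih' := ih (List.pairwise_cons.1 hp).2
      by_cases hEq : a = b
      · subst hEq
        simp [List.zip, List.nodup_cons]
      · have halt : a < b := lt_of_le_of_ne hab hEq
        have hane : a ∉ b :: u := by
          intro h
          rcases List.mem_cons.1 h with h | h
          · exact hEq h
          · exact absurd (lt_of_lt_of_le halt (hbu a h)) (lt_irrefl a)
        simp only [List.tail_cons] at ih'
        simp only [List.tail_cons, List.zip, List.zipWith, List.any_cons] at ih' ⊢
        rw [beq_eq_false_iff_ne.mpr hEq, Bool.false_or, ih']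
        simp [List.nodup_cons, hane]

-- ===== VERDICT (by name: the statement is the Claim_ definition above) =====
theorem check_combinations_spec : Claim_equal_check_combinations := by
  intro tp _
  unfold Spec_check_combinations check_combinations check_combinations_alt
  dsimp only
  have hkeys : (tp.flatMap (fun mtch => mtch.flatMap (fun table =>
      (PySem.List.pyRange 0 (table.length : Int) 2).map (fun i =>
        PySem.List.sorted (PySem.List.slice table (some i) (some (i + 2))) (fun x => x) false))))
      = (tp.flatMap (fun m => m.flatMap pvTeams)).map pvCanon := by
    simp only [List.map_flatMap, pvTeams, List.map_map, pvCanon, Function.comp_def]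
  rw [hkeys, pvGoPlan_eq]
  set K := (tp.flatMap (fun m => m.flatMap pvTeams)).map pvCanon with hK
  set S := PySem.List.sorted K (fun x => x) false with hS
  have hperm : S.Perm K := PySem.List.sorted_perm K _ false
  have hpair : S.Pairwise (· ≤ ·) := by
    rw [hS, show (@PySem.List.sorted (List Int) (List Int) List.instLT
          (fun a b => a.decidableLT b) K (fun x => x) false)
        = (@PySem.List.sorted (List Int) (List Int) List.instLinearOrder.toLT
          LinearOrder.toDecidableLT K (fun x => x) false) from by congr 1]
    exact PySem.List.sorted_pairwise K (fun x => x)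
  have hslice : PySem.List.slice S (some 1) none = S.tail := by
    rw [PySem.List.slice_from S (by norm_num : (0:Int) ≤ 1)]
    simp [List.drop_one]
  have hlen : ∀ t ∈ tp.flatMap (fun m => m.flatMap pvTeams), t.length ≤ 2 := by
    intro t ht
    simp only [List.mem_flatMap] at ht
    obtain ⟨m, _, tb, _, htt⟩ := ht
    exact pvTeams_len htt
  have hiff := pvScan_none_iff (tp.flatMap (fun m => m.flatMap pvTeams)) [] hlen
    (by simp) (by simp)
  simp only [List.nil_append] at hiff
  rw [hslice, Bool.eq_iff_iff]
  rw [Option.isNone_iff_eq_none, hiff, pvAdj S hpair, hperm.nodup_iff]
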